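-- pv_equiv track=rewrite | github.com/IgrMd/yandex-algos-training | Тренировки по алгоритмам 1.0/Лекция 7. «Сортировка событий»/C.py | students_tickets
-- ===== SOURCE A (Python) =====
-- def students_tickets(n: int, d: int, coordinates: list, ):
--     events = []
--     for coordinate in coordinates:
--         events.append((coordinate + d, 1))
--         events.append((coordinate, -1))
--
--     events.sort()
--     curr_ticket_count = 0
--     ticket_count = 0
--     for coordinate, factor in events:
--         curr_ticket_count += -factor
--         ticket_count = max(curr_ticket_count, ticket_count)
--     students = [(coordinate, student_id) for student_id, coordinate in enumerate(coordinates)]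
--     students.sort()
--     tickets = [0] * n
--     for i in range(n):
--         tickets[students[i][1]] = i % ticket_count + 1
--
--     return ticket_count, tickets
-- ===== SOURCE B (Python) =====
-- def students_tickets(n: int, d: int, coordinates: list, ):
--     # max overlap = largest number of coordinates inside a window [c-d, c]
--     ticket_count = max(
--         (sum(1 for c2 in coordinates if c - d <= c2 <= c) for c in coordinates),
--         default=0)
--     order = [sid for _, sid in sorted((c, sid) for sid, c in enumerate(coordinates))]
--     rank = {sid: r for r, sid in enumerate(order)}
--     tickets = [rank[i] % ticket_count + 1 for i in range(n)]
--     return ticket_count, tickets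
-- ===== Notes on version B (the rewrite author's own statement) =====
-- stated objective: simpler
-- what changed: Replaces the event-list sweep (build 2n (coordinate, factor) events, sort, running-sum maximum) by a direct per-coordinate window count (for each coordinate c, count coordinates in [c-d, c]), and replaces the preallocate-and-scatter ticket assignment into [0]*n by a rank dictionary built from the sorted order plus a comprehension; shorter and plainer, but quadratic in the count step.
-- outside the precondition, e.g. on students_tickets(1, 0, [1, 2]): A returns (1, [1]), B returns (1, [1]); on students_tickets(1, 0, [2, 1]): A raises IndexError, B returns (1, [1]); on students_tickets(2, -1, [1, 2]): A raises ZeroDivisionError, B raises ZeroDivisionError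
import Mathlib
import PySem

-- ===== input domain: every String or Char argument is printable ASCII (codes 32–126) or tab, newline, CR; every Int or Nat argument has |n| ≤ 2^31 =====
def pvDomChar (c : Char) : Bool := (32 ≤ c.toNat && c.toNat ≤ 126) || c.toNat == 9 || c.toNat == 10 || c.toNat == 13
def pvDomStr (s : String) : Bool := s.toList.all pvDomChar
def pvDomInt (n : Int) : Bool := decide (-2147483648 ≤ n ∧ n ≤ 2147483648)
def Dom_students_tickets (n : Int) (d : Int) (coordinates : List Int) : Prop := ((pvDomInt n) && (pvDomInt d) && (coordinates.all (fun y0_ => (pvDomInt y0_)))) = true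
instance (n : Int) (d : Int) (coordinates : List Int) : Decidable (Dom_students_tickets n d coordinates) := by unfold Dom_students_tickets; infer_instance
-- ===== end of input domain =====

-- B replaces A's event sweep by direct per-coordinate window counting and the
-- scatter assignment by a rank dictionary; an alternative of similar size (not faster).

-- ===== PORT A =====
def students_tickets (n : Int) (d : Int) (coordinates : List Int) : Int × List Int :=
  let events : List (Int × Int) :=
    coordinates.foldl (fun ev c => ev ++ [(c + d, 1), (c, -1)]) []
  let sortedEvents := PySem.List.sorted2 events (fun e => e.1) (fun e => e.2)
  let st := sortedEvents.foldl
    (fun (st : Int × Int) e =>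
      let curr := st.1 + (- e.2)
      (curr, max curr st.2)) (0, 0)
  let ticket_count := st.2
  let students := (PySem.List.enumerate coordinates 0).map (fun p => (p.2, p.1))
  let sortedStudents := PySem.List.sorted2 students (fun s => s.1) (fun s => s.2)
  let tickets0 : List Int := List.replicate n.toNat 0
  let tickets := (PySem.List.pyRange 0 n 1).foldl
    (fun acc i =>
      PySem.List.pySetD acc ((PySem.List.pyGetD sortedStudents i (0, 0)).2)
        (PySem.Int.mod i ticket_count + 1))
    tickets0
  (ticket_count, tickets)

-- ===== PORT B =====
def students_tickets_alt (n : Int) (d : Int) (coordinates : List Int) : Int × List Int :=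
  let counts : List Int := coordinates.map (fun c =>
    coordinates.foldl (fun acc c2 => if c - d ≤ c2 ∧ c2 ≤ c then acc + 1 else acc) 0)
  let ticket_count : Int := (PySem.List.max? counts (fun v => v)).getD 0
  let order : List Int :=
    (PySem.List.sorted2 ((PySem.List.enumerate coordinates 0).map (fun p => (p.2, p.1)))
      (fun s => s.1) (fun s => s.2)).map (fun s => s.2)
  let rank : PySem.Dict Int Int :=
    (PySem.List.enumerate order 0).foldl (fun dd p => dd.insert p.2 p.1) PySem.Dict.empty
  let tickets := (PySem.List.pyRange 0 n 1).map
    (fun i => PySem.Int.mod ((rank.get? i).getD 0) ticket_count + 1)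
  (ticket_count, tickets)

-- ===== PRECONDITION & SPEC =====
-- Pre_ excludes n > 0 inputs with d < 0 or n ≠ len(coordinates): there A raises
-- ZeroDivisionError (ticket_count = 0) or IndexError (tickets indexed by original
-- student ids out of range) — except that with n < len(coordinates) A happens to
-- return iff the n leftmost students carry ids < n, an accident of input order.
def Pre_students_tickets (n : Int) (d : Int) (coordinates : List Int) : Prop :=
  n ≤ 0 ∨ (n = (coordinates.length : Int) ∧ 0 ≤ d)
instance (n : Int) (d : Int) (coordinates : List Int) : Decidable (Pre_students_tickets n d coordinates) := by unfold Pre_students_tickets; infer_instance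

def pvWitness_students_tickets : Int × Int × List Int := (2, 1, [3, 1])

def Spec_students_tickets (n : Int) (d : Int) (coordinates : List Int) (out : Int × List Int) : Prop := out = students_tickets_alt n d coordinates
instance (n : Int) (d : Int) (coordinates : List Int) (out : Int × List Int) : Decidable (Spec_students_tickets n d coordinates out) := by unfold Spec_students_tickets; infer_instance

-- ===== CLAIM (what is proved, stated in full; the proofs are below) =====
def Claim_equal_students_tickets : Prop := ∀ (n : Int) (d : Int) (coordinates : List Int), Dom_students_tickets n d coordinates → Pre_students_tickets n d coordinates → Spec_students_tickets n d coordinates (students_tickets n d coordinates)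

-- ===== LEMMAS AND PROOFS =====

-- the count of coordinates inside the window [x - d, x], and its maximum
def pvCnt (d : Int) (cs : List Int) (x : Int) : Int :=
  (cs.countP (fun c2 => decide (x - d ≤ c2) && decide (c2 ≤ x)) : Int)
def pvCntMax (d : Int) (cs : List Int) : Int :=
  cs.foldl (fun m c => max m (pvCnt d cs c)) 0

-- A's running-maximum loop as a recursion
def pvRunMax : Int → Int → List (Int × Int) → Int
  | _, t, [] => t
  | c, t, e :: es => pvRunMax (c + (- e.2)) (max (c + (- e.2)) t) es

def pvPsum (S : List (Int × Int)) : Int := (S.map (fun e => -e.2)).sum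

-- Python's lexicographic tuple order on (Int, Int)
def pvLexLE (a b : Int × Int) : Prop := a.1 < b.1 ∨ (a.1 = b.1 ∧ a.2 ≤ b.2)
def pvLexLEb (a b : Int × Int) : Bool :=
  decide (a.1 < b.1) || (decide (a.1 = b.1) && decide (a.2 ≤ b.2))


-- pvEvents: the event list A builds
def pvEvents (d : Int) (cs : List Int) : List (Int × Int) :=
  cs.flatMap (fun c => [(c + d, 1), (c, -1)])

-- the strict "before" test sorted2 uses (Python tuple <)
def pvBef (a b : Int × Int) : Bool :=
  decide (a.1 < b.1) || (!decide (b.1 < a.1) && decide (a.2 < b.2))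

theorem pv_events_eq (d : Int) (cs : List Int) :
    cs.foldl (fun ev c => ev ++ [(c + d, 1), (c, -1)]) [] = pvEvents d cs := by
  simpa [pvEvents] using
    PySem.List.foldl_append_eq_flatMap (fun c => [(c + d, (1:Int)), (c, -1)]) cs []

theorem pv_countP_events (d : Int) (cs : List Int) (p : Int × Int → Bool) :
    (pvEvents d cs).countP p
      = cs.countP (fun c => p (c + d, 1)) + cs.countP (fun c => p (c, -1)) := by
  induction cs with
  | nil => simp [pvEvents]
  | cons c t ih =>
    simp only [pvEvents, List.flatMap_cons, List.countP_append, List.countP_cons] at *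
    simp only [List.countP_nil] at *
    omega

theorem pv_mem_events {d : Int} {cs : List Int} {e : Int × Int} (he : e ∈ pvEvents d cs) :
    ∃ c ∈ cs, e = (c + d, 1) ∨ e = (c, -1) := by
  simp only [pvEvents, List.mem_flatMap, List.mem_cons,
    List.not_mem_nil, or_false] at he
  obtain ⟨c, hc, h⟩ := he
  exact ⟨c, hc, h⟩

theorem pv_snd_events {d : Int} {cs : List Int} {e : Int × Int} (he : e ∈ pvEvents d cs) :
    e.2 = 1 ∨ e.2 = -1 := by
  obtain ⟨c, _, h | h⟩ := pv_mem_events he <;> subst h <;> simp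

-- insertion sort produces a pairwise-ordered list
theorem pv_insertBy_pairwise {α : Type} (bef : α → α → Bool)
    (hasym : ∀ a b, bef a b = true → bef b a = false)
    (htrans : ∀ a b c, bef a b = true → bef b c = true → bef a c = true)
    (x : α) (ys : List α) (hp : ys.Pairwise (fun a b => bef b a = false)) :
    (PySem.List.insertBy bef x ys).Pairwise (fun a b => bef b a = false) := by
  induction ys with
  | nil => simp [PySem.List.insertBy]
  | cons y ys ih =>
    rcases List.pairwise_cons.mp hp with ⟨hhead, htail⟩
    by_cases h : bef x y = true
    · simp only [PySem.List.insertBy, h, if_true]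
      refine List.pairwise_cons.mpr ⟨?_, hp⟩
      intro z hz
      rcases List.mem_cons.mp hz with rfl | hz
      · exact hasym x z h
      · by_contra hzx
        have hzx' : bef z x = true := by
          cases hb : bef z x
          · exact absurd hb hzx
          · rfl
        have := htrans z x y hzx' h
        have := hhead z hz
        simp_all
    · have h' : bef x y = false := by cases hb : bef x y; rfl; exact absurd hb h
      simp only [PySem.List.insertBy, h]
      refine List.pairwise_cons.mpr ⟨?_, ih htail⟩
      intro z hz
      rcases (PySem.List.mem_insertBy bef x z ys).mp hz with rfl | hz
      · exact h'
      · exact hhead z hz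

theorem pv_foldl_insertBy_pairwise {α : Type} (bef : α → α → Bool)
    (hasym : ∀ a b, bef a b = true → bef b a = false)
    (htrans : ∀ a b c, bef a b = true → bef b c = true → bef a c = true)
    (xs : List α) :
    ∀ (acc : List α), acc.Pairwise (fun a b => bef b a = false) →
      (xs.foldl (fun acc x => PySem.List.insertBy bef x acc) acc).Pairwise
        (fun a b => bef b a = false) := by
  induction xs with
  | nil => intro acc h; simpa using h
  | cons x xs ih =>
    intro acc h
    exact ih _ (pv_insertBy_pairwise bef hasym htrans x acc h)

theorem pv_bef_eq_true_iff (a b : Int × Int) :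
    pvBef a b = true ↔ (a.1 < b.1 ∨ (¬ b.1 < a.1 ∧ a.2 < b.2)) := by
  unfold pvBef
  cases ha : decide (a.1 < b.1) <;> cases hb : decide (b.1 < a.1) <;>
    cases hc : decide (a.2 < b.2) <;> simp_all

theorem pv_bef_asym (a b : Int × Int) : pvBef a b = true → pvBef b a = false := by
  intro h
  cases hba : pvBef b a with
  | false => rfl
  | true =>
    rw [pv_bef_eq_true_iff] at h hba
    omega

theorem pv_bef_trans (a b c : Int × Int) :
    pvBef a b = true → pvBef b c = true → pvBef a c = true := by
  intro h1 h2
  rw [pv_bef_eq_true_iff] at h1 h2 ⊢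
  omega

theorem pv_sorted2_pairwise (xs : List (Int × Int)) :
    (PySem.List.sorted2 xs (fun e => e.1) (fun e => e.2)).Pairwise pvLexLE := by
  have h : PySem.List.sorted2 xs (fun e => e.1) (fun e => e.2)
      = xs.foldl (fun acc x => PySem.List.insertBy pvBef x acc) [] := rfl
  rw [h]
  refine (pv_foldl_insertBy_pairwise pvBef pv_bef_asym pv_bef_trans xs [] (by simp)).imp ?_
  intro a b hab
  have h : ¬ (pvBef b a = true) := by simp [hab]
  rw [pv_bef_eq_true_iff] at h
  unfold pvLexLE
  omega

-- A's running-maximum loop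
theorem pv_runMax_eq (S : List (Int × Int)) : ∀ c t : Int,
    (S.foldl (fun (st : Int × Int) e =>
        let curr := st.1 + (- e.2); (curr, max curr st.2)) (c, t)).2 = pvRunMax c t S := by
  induction S with
  | nil => intro c t; simp [pvRunMax]
  | cons e es ih => intro c t; simpa [pvRunMax] using ih (c + (- e.2)) (max (c + (- e.2)) t)

theorem pv_init_le_runMax (S : List (Int × Int)) : ∀ c t : Int, t ≤ pvRunMax c t S := by
  induction S with
  | nil => intro c t; simp [pvRunMax]
  | cons e es ih =>
    intro c t
    calc t ≤ max (c + (- e.2)) t := le_max_right _ _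
    _ ≤ _ := ih _ _

theorem pv_psum_nil : pvPsum [] = 0 := rfl
theorem pv_psum_cons (e : Int × Int) (l : List (Int × Int)) :
    pvPsum (e :: l) = -e.2 + pvPsum l := by simp [pvPsum]
theorem pv_psum_append (l1 l2 : List (Int × Int)) :
    pvPsum (l1 ++ l2) = pvPsum l1 + pvPsum l2 := by simp [pvPsum]

theorem pv_prefix_le_runMax (S : List (Int × Int)) : ∀ (c t : Int) (k : Nat),
    0 < k → k ≤ S.length → c + pvPsum (S.take k) ≤ pvRunMax c t S := by
  induction S with
  | nil => intro c t k hk hlen; simp at hlen; omega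
  | cons e es ih =>
    intro c t k hk hlen
    cases k with
    | zero => omega
    | succ k' =>
      simp only [List.take_succ_cons, pv_psum_cons, pvRunMax]
      cases Nat.eq_zero_or_pos k' with
      | inl h0 =>
        subst h0
        simp only [List.take_zero, pv_psum_nil, add_zero]
        calc c + -e.2 ≤ max (c + -e.2) t := le_max_left _ _
        _ ≤ _ := pv_init_le_runMax es _ _
      | inr hpos =>
        have := ih (c + (- e.2)) (max (c + (- e.2)) t) k' hpos (by simpa using hlen)
        omega

theorem pv_runMax_cases (S : List (Int × Int)) : ∀ c t : Int,
    pvRunMax c t S = t ∨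
      ∃ k, 0 < k ∧ k ≤ S.length ∧ pvRunMax c t S = c + pvPsum (S.take k) := by
  induction S with
  | nil => intro c t; left; rfl
  | cons e es ih =>
    intro c t
    rcases ih (c + (- e.2)) (max (c + (- e.2)) t) with h | ⟨k, hk0, hklen, hkeq⟩
    · rcases le_total (c + (- e.2)) t with hle | hle
      · left; simp only [pvRunMax, h]; omega
      · right
        refine ⟨1, by omega, by simp, ?_⟩
        simp only [pvRunMax, h, List.take_succ_cons, List.take_zero, pv_psum_cons,
          pv_psum_nil]
        omega
    · right
      refine ⟨k + 1, by omega, by simpa using hklen, ?_⟩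
      simp only [pvRunMax, hkeq, List.take_succ_cons, pv_psum_cons]
      omega

theorem pv_psum_counts (L : List (Int × Int)) (h : ∀ e ∈ L, e.2 = 1 ∨ e.2 = -1) :
    pvPsum L = (L.countP (fun e => e.2 == -1) : Int) - (L.countP (fun e => e.2 == 1) : Int) := by
  induction L with
  | nil => simp [pvPsum]
  | cons e l ih =>
    have he := h e (List.mem_cons_self)
    have ihl := ih (fun x hx => h x (List.mem_cons_of_mem _ hx))
    rw [pv_psum_cons, ihl]
    rcases he with h1 | h1 <;>
      simp only [List.countP_cons, h1] <;> push_cast <;> norm_num <;> omega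

theorem pv_countP_congr {α : Type} (l : List α) (p q : α → Bool)
    (h : ∀ a ∈ l, p a = q a) : l.countP p = l.countP q := by
  induction l with
  | nil => simp
  | cons a l ih =>
    have := h a (List.mem_cons_self)
    simp only [List.countP_cons, this, ih (fun x hx => h x (List.mem_cons_of_mem _ hx))]

theorem pv_countP_split {α : Type} (l : List α) (p q : α → Bool) :
    l.countP p = l.countP (fun a => p a && q a) + l.countP (fun a => p a && !q a) := by
  induction l with
  | nil => simp
  | cons a l ih =>
    cases hp : p a <;> cases hq : q a <;>
      simp [List.countP_cons, hp, hq] <;> omega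

theorem pv_lexb_iff (a b : Int × Int) : pvLexLEb a b = true ↔ pvLexLE a b := by
  unfold pvLexLEb pvLexLE
  cases h1 : decide (a.1 < b.1) <;> cases h2 : decide (a.1 = b.1) <;>
    cases h3 : decide (a.2 ≤ b.2) <;> simp_all

theorem pv_pairwise_split {α : Type} {R : α → α → Prop} (q : α → Bool) (S : List α)
    (hp : S.Pairwise R) (hdc : ∀ a b, R a b → q b = true → q a = true) :
    ∃ k, k ≤ S.length ∧ (∀ e ∈ S.take k, q e = true) ∧ (∀ e ∈ S.drop k, q e = false) := by
  induction S with
  | nil => exact ⟨0, by omega, by simp, by simp⟩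
  | cons a S ih =>
    rcases List.pairwise_cons.mp hp with ⟨hhead, htail⟩
    cases hqa : q a with
    | false =>
      refine ⟨0, by omega, by simp, ?_⟩
      intro e he
      simp only [List.drop_zero] at he
      rcases List.mem_cons.mp he with rfl | he
      · exact hqa
      · cases hqe : q e with
        | false => rfl
        | true => exact absurd (hdc a e (hhead e he) hqe) (by simp [hqa])
    | true =>
      obtain ⟨k, hk, htake, hdrop⟩ := ih htail
      refine ⟨k + 1, by simpa using hk, ?_, ?_⟩
      · intro e he
        simp only [List.take_succ_cons] at he
        rcases List.mem_cons.mp he with rfl | he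
        · exact hqa
        · exact htake e he
      · intro e he
        simp only [List.drop_succ_cons] at he
        exact hdrop e he

-- count of the window [x-d, x] is bounded by pvCntMax
theorem pv_cntmax_nonneg (d : Int) (cs : List Int) : 0 ≤ pvCntMax d cs := by
  have h := PySem.List.le_foldl_max ((cs.map (pvCnt d cs))) (0 : Int)
  unfold pvCntMax
  rw [show cs.foldl (fun m c => max m (pvCnt d cs c)) 0
      = (cs.map (pvCnt d cs)).foldl max 0 from List.foldl_map.symm]
  exact h.1

theorem pv_cnt_le_cntmax (d : Int) (cs : List Int) (x : Int) (hx : x ∈ cs) :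
    pvCnt d cs x ≤ pvCntMax d cs := by
  have h := PySem.List.le_foldl_max ((cs.map (pvCnt d cs))) (0 : Int)
  unfold pvCntMax
  rw [show cs.foldl (fun m c => max m (pvCnt d cs c)) 0
      = (cs.map (pvCnt d cs)).foldl max 0 from List.foldl_map.symm]
  exact h.2 _ (List.mem_map_of_mem hx)

theorem pv_foldl_max_le (t : List Int) : ∀ (a M : Int), a ≤ M → (∀ y ∈ t, y ≤ M) →
    t.foldl max a ≤ M := by
  induction t with
  | nil => intro a M ha _; simpa using ha
  | cons y t ih =>
    intro a M ha h
    exact ih _ M (max_le ha (h y (List.mem_cons_self))) fun z hz => h z (List.mem_cons_of_mem _ hz)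

-- UPPER BOUND: every prefix sum of the sorted event list is at most pvCntMax
theorem pv_take_le_cntmax (d : Int) (cs : List Int) (S : List (Int × Int))
    (hperm : S.Perm (pvEvents d cs)) (hpair : S.Pairwise pvLexLE) :
    ∀ k, k ≤ S.length → pvPsum (S.take k) ≤ pvCntMax d cs := by
  intro k
  induction k with
  | zero => intro _; simpa [pvPsum] using pv_cntmax_nonneg d cs
  | succ k ih =>
    intro hk1
    have hk : k < S.length := by omega
    have htake : S.take (k + 1) = S.take k ++ [S[k]] := by
      rw [List.take_succ, List.getElem?_eq_getElem hk]
      rfl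
    have heS : S[k] ∈ S := List.getElem_mem hk
    have hee : S[k] ∈ pvEvents d cs := hperm.mem_iff.mp heS
    rcases pv_snd_events hee with h1 | h1
    · -- closing event: the prefix sum decreases
      have := ih (by omega)
      rw [htake, pv_psum_append, pv_psum_cons, pv_psum_nil, h1]
      omega
    · -- opening event (x, -1) with x ∈ cs
      obtain ⟨x, hxcs, hx⟩ := pv_mem_events hee
      have hxe : S[k] = (x, -1) := by
        rcases hx with h | h
        · exfalso; rw [h] at h1; simp at h1
        · exact h
      have hSsplit : S = S.take (k + 1) ++ S.drop (k + 1) := (List.take_append_drop _ _).symm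
      have hpairTD : (S.take (k + 1) ++ S.drop (k + 1)).Pairwise pvLexLE := by
        rw [← hSsplit]; exact hpair
      obtain ⟨hpT, _, hcross⟩ := List.pairwise_append.mp hpairTD
      have hkmem : S[k] ∈ S.take (k + 1) := by
        rw [htake]; exact List.mem_append.mpr (Or.inr (List.mem_singleton.mpr rfl))
      have hTle : ∀ u ∈ S.take (k + 1), pvLexLE u (x, -1) := by
        intro u hu
        rw [htake] at hu
        rcases List.mem_append.mp hu with hu | hu
        · have hpT' : (S.take k ++ [S[k]]).Pairwise pvLexLE := by rw [← htake]; exact hpT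
          obtain ⟨_, _, hcr⟩ := List.pairwise_append.mp hpT'
          have := hcr u hu (S[k]) (List.mem_singleton.mpr rfl)
          rwa [hxe] at this
        · have hu' : u = S[k] := List.mem_singleton.mp hu
          rw [hu', hxe]
          unfold pvLexLE
          omega
      have hdle : ∀ u ∈ S.drop (k + 1), pvLexLE (x, -1) u := by
        intro u hu
        have := hcross _ hkmem u hu
        rwa [hxe] at this
      -- bound on opens
      have hopen : (S.take (k + 1)).countP (fun e => e.2 == -1)
          ≤ cs.countP (fun c => decide (c ≤ x)) := by
        have h1' : (S.take (k + 1)).countP (fun e => e.2 == -1)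
            ≤ (S.take (k + 1)).countP (fun e => e.2 == -1 && decide (e.1 ≤ x)) := by
          apply Nat.le_of_eq
          apply pv_countP_congr
          intro u hu
          have := hTle u hu
          unfold pvLexLE at this
          cases h2 : (u.2 == -1 : Bool)
          · simp
          · have hu2 : u.2 = -1 := by simpa using h2
            have : u.1 ≤ x := by omega
            simp [this]
        have h2' : (S.take (k + 1)).countP (fun e => e.2 == -1 && decide (e.1 ≤ x))
            ≤ S.countP (fun e => e.2 == -1 && decide (e.1 ≤ x)) :=
          (List.take_sublist _ _).countP_le
        have h3' : S.countP (fun e => e.2 == -1 && decide (e.1 ≤ x))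
            = cs.countP (fun c => decide (c ≤ x)) := by
          rw [hperm.countP_eq, pv_countP_events]
          have hz : cs.countP (fun c => ((c + d, (1:Int)).2 == -1 && decide ((c + d, (1:Int)).1 ≤ x))) = 0 := by
            apply List.countP_eq_zero.mpr; intro a _; simp
          rw [hz]
          simp
        omega
      -- bound on closes
      have hclose : cs.countP (fun c => decide (c + d < x))
          ≤ (S.take (k + 1)).countP (fun e => e.2 == 1) := by
        have hdropz : (S.drop (k + 1)).countP (fun e => e.2 == 1 && decide (e.1 < x)) = 0 := by
          apply List.countP_eq_zero.mpr
          intro u hu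
          have := hdle u hu
          unfold pvLexLE at this
          simp only [Bool.and_eq_true, beq_iff_eq, decide_eq_true_eq, not_and]
          intro h2
          omega
        have h1' : S.countP (fun e => e.2 == 1 && decide (e.1 < x))
            = (S.take (k + 1)).countP (fun e => e.2 == 1 && decide (e.1 < x)) := by
          conv_lhs => rw [hSsplit]
          rw [List.countP_append, hdropz]
          omega
        have h2' : (S.take (k + 1)).countP (fun e => e.2 == 1 && decide (e.1 < x))
            ≤ (S.take (k + 1)).countP (fun e => e.2 == 1) := by
          apply List.countP_mono_left
          intro u _ hu
          simp only [Bool.and_eq_true] at hu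
          exact hu.1
        have h3' : S.countP (fun e => e.2 == 1 && decide (e.1 < x))
            = cs.countP (fun c => decide (c + d < x)) := by
          rw [hperm.countP_eq, pv_countP_events]
          have hz : cs.countP (fun c => ((c, (-1:Int)).2 == 1 && decide ((c, (-1:Int)).1 < x))) = 0 := by
            apply List.countP_eq_zero.mpr; intro a _; simp
          rw [hz]
          simp
        omega
      -- arithmetic
      have hsnd : ∀ e ∈ S.take (k + 1), e.2 = 1 ∨ e.2 = -1 :=
        fun e he => pv_snd_events (hperm.mem_iff.mp ((List.take_sublist _ _).mem he))
      have hpsum := pv_psum_counts _ hsnd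
      have hsplit := pv_countP_split cs (fun c => decide (c ≤ x)) (fun c => decide (c + d < x))
      have hmono : cs.countP (fun c => decide (c ≤ x) && decide (c + d < x))
          ≤ cs.countP (fun c => decide (c + d < x)) := by
        apply List.countP_mono_left
        intro u _ hu
        simp only [Bool.and_eq_true] at hu
        exact hu.2
      have hcnt : cs.countP (fun c => decide (c ≤ x) && !decide (c + d < x))
          = cs.countP (fun c2 => decide (x - d ≤ c2) && decide (c2 ≤ x)) := by
        apply pv_countP_congr
        intro a _
        by_cases h1 : a ≤ x <;> by_cases h2 : a + d < x <;>
          simp [h1, h2] <;> omega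
      have hxmax := pv_cnt_le_cntmax d cs x hxcs
      unfold pvCnt at hxmax
      rw [hpsum]
      omega

-- LOWER BOUND: each window count is realised by some prefix of the sorted event list
theorem pv_cnt_le_runMax (d : Int) (cs : List Int) (S : List (Int × Int))
    (hperm : S.Perm (pvEvents d cs)) (hpair : S.Pairwise pvLexLE)
    (x : Int) (hx : x ∈ cs) :
    pvCnt d cs x ≤ pvRunMax 0 0 S := by
  by_cases hd : 0 ≤ d
  case neg =>
    have : pvCnt d cs x = 0 := by
      unfold pvCnt
      have : cs.countP (fun c2 => decide (x - d ≤ c2) && decide (c2 ≤ x)) = 0 := by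
        apply List.countP_eq_zero.mpr
        intro a _ hcon
        simp only [Bool.and_eq_true, decide_eq_true_eq] at hcon
        omega
      exact_mod_cast this
    rw [this]
    exact pv_init_le_runMax S 0 0
  case pos =>
    obtain ⟨k, hk, htake, hdrop⟩ := pv_pairwise_split
      (fun u => pvLexLEb u (x, -1)) S hpair
      (by
        intro a b hab hb
        rw [pv_lexb_iff] at hb ⊢
        unfold pvLexLE at *
        omega)
    set T := S.take k with hT
    have hTS : S = T ++ S.drop k := (List.take_append_drop _ _).symm
    have hoT : T.countP (fun e => e.2 == -1) = cs.countP (fun c => decide (c ≤ x)) := by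
      have e1 : T.countP (fun e => e.2 == -1)
          = T.countP (fun e => e.2 == -1 && pvLexLEb e (x, -1)) := by
        apply pv_countP_congr
        intro u hu
        have := htake u hu
        simp [this]
      have e2 : S.countP (fun e => e.2 == -1 && pvLexLEb e (x, -1))
          = T.countP (fun e => e.2 == -1 && pvLexLEb e (x, -1)) := by
        conv_lhs => rw [hTS]
        rw [List.countP_append]
        have : (S.drop k).countP (fun e => e.2 == -1 && pvLexLEb e (x, -1)) = 0 := by
          apply List.countP_eq_zero.mpr
          intro u hu
          have := hdrop u hu
          simp [this]
        omega
      have e3 : S.countP (fun e => e.2 == -1 && pvLexLEb e (x, -1))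
          = cs.countP (fun c => decide (c ≤ x)) := by
        rw [hperm.countP_eq, pv_countP_events]
        have hz : cs.countP (fun c => ((c + d, (1:Int)).2 == -1 && pvLexLEb (c + d, 1) (x, -1))) = 0 := by
          apply List.countP_eq_zero.mpr; intro a _; simp
        rw [hz]
        have : ∀ c : Int, ((c, (-1:Int)).2 == -1 && pvLexLEb (c, -1) (x, -1)) = decide (c ≤ x) := by
          intro c
          by_cases h : c ≤ x <;> simp [pvLexLEb, h] <;> omega
        simp only [this]
        omega
      omega
    have hcT : T.countP (fun e => e.2 == 1) = cs.countP (fun c => decide (c + d < x)) := by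
      have e1 : T.countP (fun e => e.2 == 1)
          = T.countP (fun e => e.2 == 1 && pvLexLEb e (x, -1)) := by
        apply pv_countP_congr
        intro u hu
        have := htake u hu
        simp [this]
      have e2 : S.countP (fun e => e.2 == 1 && pvLexLEb e (x, -1))
          = T.countP (fun e => e.2 == 1 && pvLexLEb e (x, -1)) := by
        conv_lhs => rw [hTS]
        rw [List.countP_append]
        have : (S.drop k).countP (fun e => e.2 == 1 && pvLexLEb e (x, -1)) = 0 := by
          apply List.countP_eq_zero.mpr
          intro u hu
          have := hdrop u hu
          simp [this]
        omega
      have e3 : S.countP (fun e => e.2 == 1 && pvLexLEb e (x, -1))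
          = cs.countP (fun c => decide (c + d < x)) := by
        rw [hperm.countP_eq, pv_countP_events]
        have hz : cs.countP (fun c => ((c, (-1:Int)).2 == 1 && pvLexLEb (c, -1) (x, -1))) = 0 := by
          apply List.countP_eq_zero.mpr; intro a _; simp
        rw [hz]
        have : ∀ c : Int, ((c + d, (1:Int)).2 == 1 && pvLexLEb (c + d, 1) (x, -1)) = decide (c + d < x) := by
          intro c
          by_cases h : c + d < x <;> simp [pvLexLEb, h] <;> omega
        simp only [this]
        omega
      omega
    have hsnd : ∀ e ∈ T, e.2 = 1 ∨ e.2 = -1 := by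
      intro e he
      have : e ∈ S := (List.take_sublist _ _).mem he
      exact pv_snd_events (hperm.mem_iff.mp this)
    have hpsum := pv_psum_counts T hsnd
    -- with 0 ≤ d the two counts differ exactly by the window count
    have hsplit := pv_countP_split cs (fun c => decide (c ≤ x)) (fun c => decide (c + d < x))
    have e4 : cs.countP (fun c => decide (c ≤ x) && decide (c + d < x))
        = cs.countP (fun c => decide (c + d < x)) := by
      apply pv_countP_congr
      intro a _
      by_cases h2 : a + d < x
      · have : a ≤ x := by omega
        simp [this, h2]
      · simp [h2]
    have e5 : cs.countP (fun c => decide (c ≤ x) && !decide (c + d < x))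
        = cs.countP (fun c2 => decide (x - d ≤ c2) && decide (c2 ≤ x)) := by
      apply pv_countP_congr
      intro a _
      by_cases h1 : a ≤ x <;> by_cases h2 : a + d < x <;>
        simp [h1, h2] <;> omega
    have hval : pvCnt d cs x = pvPsum T := by
      unfold pvCnt
      rw [hpsum, hoT, hcT]
      omega
    rw [hval]
    cases Nat.eq_zero_or_pos k with
    | inl h0 =>
      subst h0
      rw [hT]
      simpa [pvPsum] using pv_init_le_runMax S 0 0
    | inr hpos =>
      rw [hT]
      simpa using pv_prefix_le_runMax S 0 0 k hpos hk

-- proof-side names for the pieces of the two ports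
def pvStudents (cs : List Int) : List (Int × Int) :=
  (PySem.List.enumerate cs 0).map (fun p => (p.2, p.1))
def pvS2 (cs : List Int) : List (Int × Int) :=
  PySem.List.sorted2 (pvStudents cs) (fun s => s.1) (fun s => s.2)
def pvOrd (cs : List Int) : List Int := (pvS2 cs).map (fun s => s.2)
def pvRank (cs : List Int) : PySem.Dict Int Int :=
  (PySem.List.enumerate (pvOrd cs) 0).foldl (fun dd p => dd.insert p.2 p.1) PySem.Dict.empty
def pvScatter (n : Int) (cs : List Int) (tc : Int) : List Int :=
  (PySem.List.pyRange 0 n 1).foldl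
    (fun acc i => PySem.List.pySetD acc
      ((PySem.List.pyGetD (pvS2 cs) i (0, 0)).2) (PySem.Int.mod i tc + 1))
    (List.replicate n.toNat 0)
def pvTickets (n : Int) (cs : List Int) (tc : Int) : List Int :=
  (PySem.List.pyRange 0 n 1).map
    (fun i => PySem.Int.mod (((pvRank cs).get? i).getD 0) tc + 1)

-- ticket_count equality: A's sweep equals the maximal window count
theorem pv_tc_eq (d : Int) (cs : List Int) :
    ((PySem.List.sorted2 (cs.foldl (fun ev c => ev ++ [(c + d, 1), (c, -1)]) [])
        (fun e => e.1) (fun e => e.2)).foldl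
      (fun (st : Int × Int) e =>
        (st.1 + -e.2, max (st.1 + -e.2) st.2)) (0, 0)).2
    = pvCntMax d cs := by
  rw [pv_events_eq]
  have hperm : (PySem.List.sorted2 (pvEvents d cs) (fun e => e.1) (fun e => e.2)).Perm
      (pvEvents d cs) := PySem.List.sorted2_perm _ _ _ _
  have hpair := pv_sorted2_pairwise (pvEvents d cs)
  set S := PySem.List.sorted2 (pvEvents d cs) (fun e => e.1) (fun e => e.2) with hS
  rw [pv_runMax_eq S 0 0]
  apply le_antisymm
  · rcases pv_runMax_cases S 0 0 with h | ⟨k, _, hk, h⟩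
    · rw [h]; exact pv_cntmax_nonneg d cs
    · rw [h]
      simpa using pv_take_le_cntmax d cs S hperm hpair k hk
  · unfold pvCntMax
    rw [show cs.foldl (fun m c => max m (pvCnt d cs c)) 0
        = (cs.map (pvCnt d cs)).foldl max 0 from List.foldl_map.symm]
    apply pv_foldl_max_le
    · exact pv_init_le_runMax S 0 0
    · intro y hy
      obtain ⟨x, hx, rfl⟩ := List.mem_map.mp hy
      exact pv_cnt_le_runMax d cs S hperm hpair x hx

-- B's max-with-default equals the maximal window count
theorem pv_tcB_eq (d : Int) (cs : List Int) :
    (PySem.List.max?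
        (cs.map (fun c => cs.foldl (fun acc c2 => if c - d ≤ c2 ∧ c2 ≤ c then acc + 1 else acc) 0))
        (fun v => v)).getD 0
    = pvCntMax d cs := by
  have hmap : cs.map (fun c => cs.foldl (fun acc c2 => if c - d ≤ c2 ∧ c2 ≤ c then acc + 1 else acc) 0)
      = cs.map (pvCnt d cs) := by
    apply List.map_congr_left
    intro c _
    have hc : cs.countP (fun c2 => decide (c - d ≤ c2 ∧ c2 ≤ c))
        = cs.countP (fun c2 => decide (c - d ≤ c2) && decide (c2 ≤ c)) := by
      apply pv_countP_congr
      intro a _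
      by_cases h1 : c - d ≤ a <;> by_cases h2 : a ≤ c <;> simp [h1, h2]
    rw [PySem.List.foldl_ite_add_one (fun c2 => c - d ≤ c2 ∧ c2 ≤ c) cs 0]
    unfold pvCnt
    rw [hc]
    omega
  rw [hmap]
  rcases cs with _ | ⟨c, t⟩
  · simp [pvCntMax, PySem.List.max?]
  · rw [List.map_cons, PySem.List.max?_id_cons, Option.getD_some]
    unfold pvCntMax
    rw [show (c :: t).foldl (fun m c' => max m (pvCnt d (c :: t) c')) 0
        = ((c :: t).map (pvCnt d (c :: t))).foldl max 0 from List.foldl_map.symm]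
    rw [List.map_cons, List.foldl_cons]
    have h0 : (0 : Int) ≤ pvCnt d (c :: t) c := by unfold pvCnt; positivity
    rw [max_eq_right h0]

-- rank dictionary lookup
theorem pv_get?_rank (ord : List Int) : ∀ (_hnd : ord.Nodup) (j s : Int) (D0 : PySem.Dict Int Int),
    ((PySem.List.enumerate ord s).foldl (fun dd p => dd.insert p.2 p.1) D0).get? j
      = if j ∈ ord then some (s + (ord.idxOf j : Int)) else D0.get? j := by
  induction ord with
  | nil => intro _ j s D0; simp [PySem.List.enumerate]
  | cons a t ih =>
    intro hnd j s D0
    obtain ⟨hat, hndt⟩ := List.nodup_cons.mp hnd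
    rw [PySem.List.enumerate_cons, List.foldl_cons, ih hndt j (s + 1) (D0.insert a s)]
    by_cases hjt : j ∈ t
    · have hne : a ≠ j := fun h => hat (h ▸ hjt)
      rw [if_pos hjt, if_pos (List.mem_cons_of_mem _ hjt), List.idxOf_cons_ne t hne]
      have : s + 1 + (List.idxOf j t : Int) = s + (((List.idxOf j t).succ : Nat) : Int) := by
        push_cast; ring
      rw [this]
    · rw [if_neg hjt]
      by_cases hja : j = a
      · subst hja
        rw [if_pos (List.mem_cons_self), PySem.Dict.get?_insert_self, List.idxOf_cons_self]
        simp
      · rw [if_neg (by simp [hja, hjt]), PySem.Dict.get?_insert_of_ne _ _ hja]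

-- scatter loop: length is preserved
theorem pv_scatter_length (f : Int → Int) (ord : List Int) : ∀ (s : Int) (xs : List Int),
    ((PySem.List.enumerate ord s).foldl
      (fun acc p => PySem.List.pySetD acc p.2 (f p.1)) xs).length = xs.length := by
  induction ord with
  | nil => intro s xs; simp [PySem.List.enumerate]
  | cons a t ih =>
    intro s xs
    rw [PySem.List.enumerate_cons, List.foldl_cons, ih (s + 1) _,
      PySem.List.length_pySetD]

-- scatter loop: entries
theorem pv_scatter_getD (f : Int → Int) (ord : List Int) : ∀ (s : Int) (xs : List Int),
    ord.Nodup → (∀ e ∈ ord, 0 ≤ e ∧ e < (xs.length : Int)) →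
    ∀ (j : Nat), j < xs.length →
      ((PySem.List.enumerate ord s).foldl
        (fun acc p => PySem.List.pySetD acc p.2 (f p.1)) xs).getD j 0
      = if (j : Int) ∈ ord then f (s + (ord.idxOf (j : Int) : Int)) else xs.getD j 0 := by
  induction ord with
  | nil => intro s xs _ _ j hj; simp [PySem.List.enumerate]
  | cons a t ih =>
    intro s xs hnd hbnd j hj
    obtain ⟨hat, hndt⟩ := List.nodup_cons.mp hnd
    obtain ⟨ha0, halt⟩ := hbnd a List.mem_cons_self
    rw [PySem.List.enumerate_cons, List.foldl_cons]
    have hlen1 : (PySem.List.pySetD xs a (f s)).length = xs.length :=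
      PySem.List.length_pySetD xs a (f s)
    have hbl : ∀ e ∈ t, 0 ≤ e ∧ e < ((PySem.List.pySetD xs a (f s)).length : Int) := by
      rw [hlen1]; exact fun e he => hbnd e (List.mem_cons_of_mem _ he)
    rw [ih (s + 1) _ hndt hbl j (by omega)]
    have hgd : (PySem.List.pySetD xs a (f s)).getD j 0
        = if (j : Int) = a then f s else xs.getD j 0 := by
      have hcast : a = ((a.toNat : Nat) : Int) := by omega
      have hmlt : a.toNat < xs.length := by omega
      have := PySem.List.pyGetD_pySetD_natCast xs a.toNat j (f s) 0 hmlt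
      rw [hcast]
      rw [← PySem.List.pyGetD_natCast ((PySem.List.pySetD xs ((a.toNat : Nat) : Int) (f s))) j 0,
        ← PySem.List.pyGetD_natCast xs j 0, this]
      by_cases hjm : j = a.toNat
      · rw [if_pos hjm, if_pos (by omega)]
      · rw [if_neg hjm, if_neg (by omega)]
    by_cases hjt : (j : Int) ∈ t
    · have hne : a ≠ (j : Int) := fun h => hat (h ▸ hjt)
      rw [if_pos hjt, if_pos (List.mem_cons_of_mem _ hjt), List.idxOf_cons_ne t hne]
      have : s + 1 + (List.idxOf (j : Int) t : Int)
          = s + (((List.idxOf (j : Int) t).succ : Nat) : Int) := by push_cast; ring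
      rw [this]
    · rw [if_neg hjt, hgd]
      by_cases hja : (j : Int) = a
      · rw [if_pos hja, if_pos (by simp [hja]), hja, List.idxOf_cons_self]
        simp
      · rw [if_neg hja, if_neg (by simp [hja, hjt])]

theorem pv_enumerate_map {α β : Type} (g : α → β) (l : List α) : ∀ s : Int,
    PySem.List.enumerate (l.map g) s = (PySem.List.enumerate l s).map (fun p => (p.1, g p.2)) := by
  induction l with
  | nil => intro s; simp [PySem.List.enumerate]
  | cons a l ih => intro s; simp [PySem.List.enumerate_cons, ih]

-- the two ticket computations agree (for any common ticket_count value)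
theorem pv_tickets_eq (n : Int) (cs : List Int) (tc : Int)
    (h : n ≤ 0 ∨ n = (cs.length : Int)) :
    pvScatter n cs tc = pvTickets n cs tc := by
  rcases h with h | h
  · have hr : PySem.List.pyRange 0 n 1 = [] := PySem.List.pyRange_one_eq_nil h
    have ht : n.toNat = 0 := Int.toNat_of_nonpos h
    simp [pvScatter, pvTickets, hr, ht]
  · set m := cs.length with hm
    have hlenstu : (pvStudents cs).length = m := by
      unfold pvStudents
      rw [List.length_map, PySem.List.length_enumerate]
    have hlenS2 : (pvS2 cs).length = m := by
      have := (PySem.List.sorted2_perm (pvStudents cs)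
        (fun s => s.1) (fun s => s.2) false).length_eq
      unfold pvS2
      omega
    have hordeq : (pvStudents cs).map (fun s => s.2) = PySem.List.pyRange 0 (m : Int) 1 := by
      have h1 := PySem.List.map_fst_enumerate cs 0
      unfold pvStudents
      rw [List.map_map]
      simpa using h1
    have hordperm : (pvOrd cs).Perm (PySem.List.pyRange 0 (m : Int) 1) := by
      have hp := (PySem.List.sorted2_perm (pvStudents cs)
        (fun s => s.1) (fun s => s.2) false).map (fun s : Int × Int => s.2)
      rw [hordeq] at hp
      exact hp
    have hordnd : (pvOrd cs).Nodup :=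
      hordperm.nodup_iff.mpr (PySem.List.nodup_pyRange_one 0 (m : Int))
    have hordmem : ∀ e ∈ pvOrd cs, 0 ≤ e ∧ e < (m : Int) := by
      intro e he
      exact PySem.List.mem_pyRange_one.mp (hordperm.mem_iff.mp he)
    have htn : n.toNat = m := by omega
    -- rewrite the scatter loop as a fold over (enumerate ord)
    have hL : pvScatter n cs tc
        = (PySem.List.enumerate (pvOrd cs) 0).foldl
            (fun acc p => PySem.List.pySetD acc p.2 (PySem.Int.mod p.1 tc + 1))
            (List.replicate n.toNat 0) := by
      have hmid : (PySem.List.enumerate (pvS2 cs) 0).foldl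
            (fun acc p => PySem.List.pySetD acc p.2.2 (PySem.Int.mod p.1 tc + 1))
            (List.replicate n.toNat 0)
          = pvScatter n cs tc := by
        rw [PySem.List.enumerate_eq_map_pyRange (pvS2 cs) ((0 : Int), (0 : Int)),
          List.foldl_map]
        unfold pvScatter
        have : n = PySem.List.len (pvS2 cs) := by
          simp [PySem.List.len, hlenS2]; omega
        rw [← this]
      rw [← hmid]
      unfold pvOrd
      rw [pv_enumerate_map, List.foldl_map]
    rw [hL]
    unfold pvTickets
    have hlenL : ((PySem.List.enumerate (pvOrd cs) 0).foldl
        (fun acc p => PySem.List.pySetD acc p.2 (PySem.Int.mod p.1 tc + 1))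
        (List.replicate n.toNat 0)).length = m := by
      rw [pv_scatter_length (fun i => PySem.Int.mod i tc + 1) (pvOrd cs) 0
        (List.replicate n.toNat 0)]
      simp [htn]
    apply List.ext_getElem
    · rw [hlenL]
      simp [PySem.List.length_pyRange_one]
      omega
    · intro i h1 h2
      have him : i < m := by omega
      have himem : (i : Int) ∈ pvOrd cs := by
        apply hordperm.mem_iff.mpr
        rw [PySem.List.mem_pyRange_one]
        constructor
        · positivity
        · exact_mod_cast him
      have hrep : (List.replicate n.toNat (0 : Int)).length = m := by simp [htn]
      have hbnd : ∀ e ∈ pvOrd cs, 0 ≤ e ∧ e < ((List.replicate n.toNat (0 : Int)).length : Int) := by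
        rw [hrep]; exact hordmem
      have hgetL := pv_scatter_getD (fun i => PySem.Int.mod i tc + 1) (pvOrd cs) 0
        (List.replicate n.toNat 0) hordnd hbnd i (by omega)
      rw [if_pos himem] at hgetL
      have hL' : ((PySem.List.enumerate (pvOrd cs) 0).foldl
          (fun acc p => PySem.List.pySetD acc p.2 (PySem.Int.mod p.1 tc + 1))
          (List.replicate n.toNat 0))[i]
          = PySem.Int.mod (0 + ((pvOrd cs).idxOf (i : Int) : Int)) tc + 1 := by
        rw [← List.getD_eq_getElem _ 0 h1]
        exact hgetL
      rw [hL', List.getElem_map, PySem.List.getElem_pyRange_one]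
      have hrank : (pvRank cs).get? (0 + (i : Int)) = some (0 + ((pvOrd cs).idxOf (i : Int) : Int)) := by
        unfold pvRank
        rw [pv_get?_rank (pvOrd cs) hordnd (0 + (i : Int)) 0 PySem.Dict.empty]
        rw [zero_add, if_pos himem]
      rw [hrank, Option.getD_some]

-- ===== VERDICT (by name: the statement is the Claim_ definition above) =====
theorem students_tickets_spec : Claim_equal_students_tickets := by
  intro n d cs _ hpre
  unfold Spec_students_tickets
  have hA : students_tickets n d cs = (pvCntMax d cs, pvScatter n cs (pvCntMax d cs)) := by
    simp only [students_tickets]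
    rw [pv_tc_eq d cs]
    rfl
  have hB : students_tickets_alt n d cs = (pvCntMax d cs, pvTickets n cs (pvCntMax d cs)) := by
    simp only [students_tickets_alt]
    rw [pv_tcB_eq d cs]
    rfl
  rw [hA, hB, pv_tickets_eq n cs (pvCntMax d cs)
    (hpre.imp (fun h => h) (fun h => h.1))]
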